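-- pv_equiv track=rewrite | github.com/danielrsg20-blip/Out-of-Touch-DND | backend/scripts/import_srd_2024.py | _collect_class_spell_lists
-- ===== SOURCE A (Python) =====
-- from typing import Any
--
-- def _collect_class_spell_lists(spells: dict[str, dict[str, Any]]) -> dict[str, list[str]]:
--     by_class: dict[str, list[str]] = {}
--     for name, spell in spells.items():
--         for class_name in spell.get("classes", []):
--             by_class.setdefault(class_name, []).append(name)
--
--     for class_name in by_class:
--         by_class[class_name] = sorted(set(by_class[class_name]))
--
--     return dict(sorted(by_class.items()))
-- ===== SOURCE B (Python) =====
-- def _collect_class_spell_lists(spells):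
--     # Sort the spells by name first; one pass then builds each class bucket
--     # already in sorted order, deduping with a parallel per-class seen-set.
--     by_class = {}
--     seen = {}
--     for name, spell in sorted(spells.items(), key=lambda kv: kv[0]):
--         for class_name in spell.get("classes", []):
--             bucket = seen.setdefault(class_name, set())
--             if name not in bucket:
--                 bucket.add(name)
--                 by_class.setdefault(class_name, []).append(name)
--     return dict(sorted(by_class.items(), key=lambda kv: kv[0]))
-- ===== Notes on version B (the rewrite author's own statement) =====
-- stated objective: alternative
-- what changed: Instead of grouping in input order and then running sorted(set(...)) over every bucket, B sorts the spell items by name once up front and does a single grouping pass with a per-class seen-set, so each bucket comes out deduplicated and sorted with no per-bucket post-processing.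
import Mathlib
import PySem

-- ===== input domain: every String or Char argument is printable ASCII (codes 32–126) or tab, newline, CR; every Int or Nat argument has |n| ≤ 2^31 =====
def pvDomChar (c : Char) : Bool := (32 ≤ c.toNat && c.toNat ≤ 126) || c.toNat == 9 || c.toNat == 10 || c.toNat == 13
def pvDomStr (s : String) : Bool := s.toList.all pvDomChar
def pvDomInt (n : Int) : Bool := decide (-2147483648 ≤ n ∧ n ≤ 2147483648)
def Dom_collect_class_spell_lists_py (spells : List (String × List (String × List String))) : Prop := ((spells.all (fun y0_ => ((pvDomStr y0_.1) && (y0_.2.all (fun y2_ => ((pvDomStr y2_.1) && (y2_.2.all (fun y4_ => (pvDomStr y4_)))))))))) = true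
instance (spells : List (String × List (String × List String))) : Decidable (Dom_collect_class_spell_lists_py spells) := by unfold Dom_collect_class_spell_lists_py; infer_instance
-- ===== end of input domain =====

-- B sorts the spell items by name once and groups in one pass with a per-class seen-set,
-- so buckets need no per-bucket sorted(set(...)) step; alternative decomposition, same O(n log n) cost.


-- ===== PORT A =====
def collect_class_spell_lists_py (spells : List (String × List (String × List String))) : List (String × List String) :=
  -- by_class = {}; for name, spell in spells.items(): for class_name in spell.get("classes", []): by_class.setdefault(class_name, []).append(name)
  let by_class : PySem.Dict String (List String) :=
    spells.foldl (fun d p =>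
      ((PySem.Dict.mk p.2).getD "classes" []).foldl
        (fun d cn => d.modify cn [] (fun b => b ++ [p.1])) d) PySem.Dict.empty
  -- for class_name in by_class: by_class[class_name] = sorted(set(by_class[class_name]))
  let by_class2 : PySem.Dict String (List String) :=
    by_class.keys.foldl
      (fun d k => d.insert k (PySem.List.sorted (PySem.Set.ofList (d.getD k [])) (fun x => x) false)) by_class
  -- dict(sorted(by_class.items())): dict keys are unique, so Python's tuple comparison
  -- never reaches the second component; sorting by the key is exact here.
  PySem.List.sorted by_class2.items (fun q => q.1) false

-- ===== PORT B =====
def collect_class_spell_lists_py_alt (spells : List (String × List (String × List String))) : List (String × List String) :=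
  -- for name, spell in sorted(spells.items(), key=lambda kv: kv[0]): ...
  let sortedSpells := PySem.List.sorted spells (fun p => p.1) false
  let st : PySem.Dict String (List String) × PySem.Dict String (PySem.Set String) :=
    sortedSpells.foldl (fun st p =>
      ((PySem.Dict.mk p.2).getD "classes" []).foldl (fun st cn =>
        let bucket := st.2.getD cn PySem.Set.empty
        if p.1 ∈ bucket then st
        else (st.1.modify cn [] (fun b => b ++ [p.1]), st.2.insert cn (PySem.Set.add bucket p.1))) st)
      (PySem.Dict.empty, PySem.Dict.empty)
  -- dict(sorted(by_class.items(), key=lambda kv: kv[0]))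
  PySem.List.sorted st.1.items (fun q => q.1) false

-- ===== PRECONDITION & SPEC =====
def Spec_collect_class_spell_lists_py (spells : List (String × List (String × List String))) (out : List (String × List String)) : Prop := out = collect_class_spell_lists_py_alt spells
instance (spells : List (String × List (String × List String))) (out : List (String × List String)) : Decidable (Spec_collect_class_spell_lists_py spells out) := by unfold Spec_collect_class_spell_lists_py; infer_instance

-- ===== CLAIM (what is proved, stated in full; the proofs are below) =====
def Claim_equal_collect_class_spell_lists_py : Prop := ∀ (spells : List (String × List (String × List String))), Dom_collect_class_spell_lists_py spells → Spec_collect_class_spell_lists_py spells (collect_class_spell_lists_py spells)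

-- ===== LEMMAS AND PROOFS =====

-- spell.get("classes", [])
def pvClasses (p : String × List (String × List String)) : List String :=
  (PySem.Dict.mk p.2).getD "classes" []

-- all (class_name, name) contributions, in traversal order
def pvContribs (spells : List (String × List (String × List String))) : List (String × String) :=
  spells.flatMap (fun p => (pvClasses p).map (fun cn => (cn, p.1)))

-- the names contributed to class c, in traversal order (with multiplicity)
def pvNames (spells : List (String × List (String × List String))) (c : String) : List String :=
  ((pvContribs spells).filter (fun q => q.1 == c)).map (fun q => q.2)

-- the common per-class value: sorted(set(names))
def pvV (spells : List (String × List (String × List String))) (c : String) : List String :=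
  PySem.List.sorted (PySem.Set.ofList (pvNames spells c)) (fun x => x) false

-- A's grouping loop, flattened over the contribution list
def pvGroupA (spells : List (String × List (String × List String))) : PySem.Dict String (List String) :=
  (pvContribs spells).foldl (fun d q => d.modify q.1 [] (fun b => b ++ [q.2])) PySem.Dict.empty

-- B's loop body over one (class_name, name) contribution
def pvStepB (st : PySem.Dict String (List String) × PySem.Dict String (PySem.Set String))
    (q : String × String) : PySem.Dict String (List String) × PySem.Dict String (PySem.Set String) :=
  let bucket := st.2.getD q.1 PySem.Set.empty
  if q.2 ∈ bucket then st
  else (st.1.modify q.1 [] (fun b => b ++ [q.2]), st.2.insert q.1 (PySem.Set.add bucket q.2))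

-- the nested for-loops are a fold over the flattened contribution list
lemma pv_fold_flatten {σ : Type} (F : σ → String × String → σ)
    (l : List (String × List (String × List String))) (s : σ) :
    l.foldl (fun s p => (pvClasses p).foldl (fun s cn => F s (cn, p.1)) s) s
      = (pvContribs l).foldl F s := by
  simp [pvContribs, List.foldl_flatMap, List.foldl_map]

lemma pv_add_of_mem {s : PySem.Set String} {x : String} (h : x ∈ s) : s.add x = s := by
  simp [PySem.Set.add, PySem.Set.contains, h]

lemma pv_add_of_not_mem {s : PySem.Set String} {x : String} (h : ¬ x ∈ s) :
    s.add x = s ++ [x] := by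
  simp [PySem.Set.add, PySem.Set.contains, h]

lemma pv_update_of_subset : ∀ (l : List String) (s : PySem.Set String),
    (∀ x ∈ l, x ∈ s) → PySem.Set.update s l = s := by
  intro l
  induction l with
  | nil => intro s h; rfl
  | cons x t ih =>
    intro s h
    have hx : x ∈ s := h x (by simp)
    have h1 : PySem.Set.update s (x :: t) = PySem.Set.update (s.add x) t := by
      simp [PySem.Set.update]
    rw [h1, pv_add_of_mem hx]
    exact ih s (fun y hy => h y (by simp [hy]))

lemma pv_ofList_sublist (xs : List String) : (PySem.Set.ofList xs).Sublist xs := by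
  have H : ∀ (xs ys : List String) (s : PySem.Set String),
      s.Sublist ys → (xs.foldl PySem.Set.add s).Sublist (ys ++ xs) := by
    intro xs
    induction xs with
    | nil => intro ys s h; simpa using h
    | cons x t ih =>
      intro ys s h
      have h2 : (PySem.Set.add s x).Sublist (ys ++ [x]) := by
        by_cases hm : x ∈ s
        · rw [pv_add_of_mem hm]; exact h.trans (List.sublist_append_left ys [x])
        · rw [pv_add_of_not_mem hm]; exact List.Sublist.append h (List.Sublist.refl _)
      simpa [List.append_assoc] using ih (ys ++ [x]) _ h2
  simpa [PySem.Set.ofList_eq_foldl] using H xs [] [] (List.Sublist.refl _)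

lemma pv_ofList_pairwise_lt {xs : List String} (h : xs.Pairwise (· ≤ ·)) :
    (PySem.Set.ofList xs).Pairwise (· < ·) := by
  have h1 := List.Pairwise.sublist (pv_ofList_sublist xs) h
  have h2 := PySem.Set.nodup_ofList xs
  exact (h1.and h2).imp (fun hp => lt_of_le_of_ne hp.1 hp.2)

lemma pvGroupA_keys (spells : List (String × List (String × List String))) :
    (pvGroupA spells).keys = PySem.Set.ofList ((pvContribs spells).map (fun q => q.1)) := by
  unfold pvGroupA
  rw [PySem.Dict.keys_foldl_modify_key (pvContribs spells) (fun q => q.1) []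
      (fun _ q => fun b => b ++ [q.2])]
  rw [PySem.Dict.keys_empty]
  rfl

lemma pvGroupA_nodup (spells : List (String × List (String × List String))) :
    (pvGroupA spells).keys.Nodup := by
  unfold pvGroupA
  exact PySem.Dict.nodup_keys_foldl_modify_key (pvContribs spells) (fun q => q.1) []
    (fun _ q => fun b => b ++ [q.2]) _ PySem.Dict.nodup_keys_empty

lemma pvGroupA_getD (spells : List (String × List (String × List String))) (c : String) :
    (pvGroupA spells).getD c [] = pvNames spells c := by
  unfold pvGroupA pvNames
  rw [PySem.Dict.getD_foldl_modify_append]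
  rw [PySem.Dict.getD_empty]
  rfl

-- A's per-bucket rewrite loop: effect on lookups
lemma pv_reassign_getD (g : List String → List String) :
    ∀ (ks : List String) (d : PySem.Dict String (List String)) (k : String), ks.Nodup →
    ((ks.foldl (fun d k => d.insert k (g (d.getD k []))) d).getD k []) =
      if k ∈ ks then g (d.getD k []) else d.getD k [] := by
  intro ks
  induction ks with
  | nil => intro d k h; simp
  | cons a t ih =>
    intro d k h
    rcases List.nodup_cons.mp h with ⟨ha, ht⟩
    simp only [List.foldl_cons]
    rw [ih _ k ht]
    by_cases hkt : k ∈ t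
    · have hne : k ≠ a := fun e => ha (e ▸ hkt)
      simp [hkt, hne, PySem.Dict.getD_insert]
    · by_cases hka : k = a
      · subst hka; simp [hkt]
      · simp [hkt, hka, PySem.Dict.getD_insert]

-- A's final value, characterised
lemma portA_eq (spells : List (String × List (String × List String))) :
    collect_class_spell_lists_py spells
      = PySem.List.sorted
          ((PySem.Set.ofList ((pvContribs spells).map (fun q => q.1))).map
            (fun k => (k, pvV spells k))) (fun q => q.1) false := by
  have hA : (spells.foldl (fun d p =>
      ((PySem.Dict.mk p.2).getD "classes" []).foldl
        (fun d cn => d.modify cn [] (fun b => b ++ [p.1])) d) PySem.Dict.empty) = pvGroupA spells := by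
    rw [pvGroupA]
    exact pv_fold_flatten
      (fun (d : PySem.Dict String (List String)) q => d.modify q.1 [] (fun b => b ++ [q.2]))
      spells PySem.Dict.empty
  simp only [collect_class_spell_lists_py]
  rw [hA]
  set d2 := (pvGroupA spells).keys.foldl
      (fun d k => d.insert k (PySem.List.sorted (PySem.Set.ofList (d.getD k [])) (fun x => x) false))
      (pvGroupA spells) with hd2
  have hnd2 : d2.keys.Nodup := PySem.Dict.nodup_keys_foldl_insert _ _ _ (pvGroupA_nodup spells)
  have hkeys2 : d2.keys = (pvGroupA spells).keys := by
    rw [hd2, PySem.Dict.keys_foldl_insert]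
    exact pv_update_of_subset _ _ (fun x hx => hx)
  rw [PySem.Dict.items_eq_map_keys d2 hnd2 [], hkeys2, pvGroupA_keys]
  congr 1
  apply List.map_congr_left
  intro k hk
  have hmem : k ∈ (pvGroupA spells).keys := by rw [pvGroupA_keys]; exact hk
  rw [hd2, pv_reassign_getD (fun v => PySem.List.sorted (PySem.Set.ofList v) (fun x => x) false)
        (pvGroupA spells).keys (pvGroupA spells) k (pvGroupA_nodup spells),
      if_pos hmem, pvGroupA_getD]
  rfl

lemma pv_update_cons (s : PySem.Set String) (x : String) (l : List String) :
    PySem.Set.update s (x :: l) = PySem.Set.update (s.add x) l := rfl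

lemma pv_keys_modify_add {ν : Type} (d : PySem.Dict String ν) (k : String) (d0 : ν) (f : ν → ν) :
    (d.modify k d0 f).keys = PySem.Set.add d.keys k := by
  rw [PySem.Dict.keys_modify]
  by_cases hc : d.contains k = true
  · rw [PySem.Dict.keys_insert_of_contains _ _ hc,
        pv_add_of_mem ((PySem.Dict.contains_iff_mem_keys d k).mp hc)]
  · have hc' : d.contains k = false := by simpa using hc
    rw [PySem.Dict.keys_insert_of_not_contains _ _ hc',
        pv_add_of_not_mem (fun hmem => by simp [(PySem.Dict.contains_iff_mem_keys d k).mpr hmem] at hc')]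

-- B's grouping pass: invariant of the (by_class, seen) pair
lemma pvB_inv : ∀ (l : List (String × String)) (d1 : PySem.Dict String (List String))
    (d2 : PySem.Dict String (PySem.Set String)),
    (∀ c, d2.getD c PySem.Set.empty = d1.getD c []) →
    (∀ c, d1.getD c [] ≠ [] → c ∈ d1.keys) →
    (∀ c, (l.foldl pvStepB (d1, d2)).1.getD c []
        = PySem.Set.update (d1.getD c []) ((l.filter (fun q => q.1 == c)).map (fun q => q.2)))
    ∧ (l.foldl pvStepB (d1, d2)).1.keys = PySem.Set.update d1.keys (l.map (fun q => q.1))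
    ∧ (∀ c, (l.foldl pvStepB (d1, d2)).2.getD c PySem.Set.empty = (l.foldl pvStepB (d1, d2)).1.getD c [])
    ∧ (∀ c, (l.foldl pvStepB (d1, d2)).1.getD c [] ≠ [] → c ∈ (l.foldl pvStepB (d1, d2)).1.keys) := by
  intro l
  induction l with
  | nil =>
    intro d1 d2 hinv hkey
    exact ⟨fun c => rfl, rfl, hinv, hkey⟩
  | cons q t ih =>
    intro d1 d2 hinv hkey
    by_cases hm : q.2 ∈ d2.getD q.1 PySem.Set.empty
    · -- name already seen for this class: the step is a no-op
      have hstep : pvStepB (d1, d2) q = (d1, d2) := by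
        simp only [pvStepB]
        rw [if_pos hm]
      have hm1 : q.2 ∈ d1.getD q.1 [] := by rw [← hinv]; exact hm
      have hk1 : q.1 ∈ d1.keys := hkey q.1 (by intro h0; rw [h0] at hm1; exact (List.not_mem_nil hm1))
      obtain ⟨ha, hb, hc, hd⟩ := ih d1 d2 hinv hkey
      simp only [List.foldl_cons, hstep]
      refine ⟨?_, ?_, hc, hd⟩
      · intro c
        by_cases hqc : q.1 = c
        · subst hqc
          simp only [List.filter_cons, BEq.rfl, if_pos, List.map_cons]
          rw [pv_update_cons, pv_add_of_mem hm1]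
          exact ha q.1
        · have : (q.1 == c) = false := by simpa using hqc
          simp only [List.filter_cons, this]
          exact ha c
      · simp only [List.map_cons]
        rw [pv_update_cons, pv_add_of_mem hk1]
        exact hb
    · -- new name for this class: append to the bucket and to the seen-set
      have hstep : pvStepB (d1, d2) q
          = (d1.modify q.1 [] (fun b => b ++ [q.2]),
             d2.insert q.1 (PySem.Set.add (d2.getD q.1 PySem.Set.empty) q.2)) := by
        simp only [pvStepB]
        rw [if_neg hm]
      have hm1 : ¬ q.2 ∈ d1.getD q.1 [] := by rw [← hinv]; exact hm
      have hinv' : ∀ c, (d2.insert q.1 (PySem.Set.add (d2.getD q.1 PySem.Set.empty) q.2)).getD c PySem.Set.empty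
          = (d1.modify q.1 [] (fun b => b ++ [q.2])).getD c [] := by
        intro c
        rw [PySem.Dict.getD_insert, PySem.Dict.getD_modify]
        by_cases hqc : c = q.1
        · simp only [hqc, if_pos]
          rw [pv_add_of_not_mem hm, hinv q.1]
        · simp only [hqc, if_false]
          exact hinv c
      have hkey' : ∀ c, (d1.modify q.1 [] (fun b => b ++ [q.2])).getD c [] ≠ []
          → c ∈ (d1.modify q.1 [] (fun b => b ++ [q.2])).keys := by
        intro c _
        rw [pv_keys_modify_add]
        by_cases hqc : c = q.1
        · exact (PySem.Set.mem_add _ _ _).mpr (Or.inr hqc)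
        · rw [PySem.Dict.getD_modify] at *
          exact (PySem.Set.mem_add _ _ _).mpr (Or.inl (hkey c (by
            rename_i hne
            simpa [hqc] using hne)))
      obtain ⟨ha, hb, hc, hd⟩ := ih _ _ hinv' hkey'
      simp only [List.foldl_cons, hstep]
      refine ⟨?_, ?_, hc, hd⟩
      · intro c
        rw [ha c, PySem.Dict.getD_modify]
        by_cases hqc : q.1 = c
        · subst hqc
          simp only [List.filter_cons, BEq.rfl, List.map_cons, if_pos]
          rw [pv_update_cons, pv_add_of_not_mem hm1]
        · have hbc : (q.1 == c) = false := by simpa using hqc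
          have hcc : ¬ (c = q.1) := fun e => hqc e.symm
          simp [hbc, hcc]
      · rw [hb, pv_keys_modify_add]
        simp only [List.map_cons]
        rw [pv_update_cons]

-- B's final value, characterised
lemma portB_eq (spells : List (String × List (String × List String))) :
    collect_class_spell_lists_py_alt spells
      = PySem.List.sorted
          ((PySem.Set.ofList ((pvContribs (PySem.List.sorted spells (fun p => p.1) false)).map (fun q => q.1))).map
            (fun k => (k, PySem.Set.ofList (pvNames (PySem.List.sorted spells (fun p => p.1) false) k))))
          (fun q => q.1) false := by
  simp only [collect_class_spell_lists_py_alt]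
  have hB : (PySem.List.sorted spells (fun p => p.1) false).foldl
      (fun st p => ((PySem.Dict.mk p.2).getD "classes" []).foldl (fun st cn =>
        let bucket := st.2.getD cn PySem.Set.empty
        if p.1 ∈ bucket then st
        else (st.1.modify cn [] (fun b => b ++ [p.1]), st.2.insert cn (PySem.Set.add bucket p.1))) st)
      (PySem.Dict.empty, PySem.Dict.empty)
      = (pvContribs (PySem.List.sorted spells (fun p => p.1) false)).foldl pvStepB
          (PySem.Dict.empty, PySem.Dict.empty) :=
    pv_fold_flatten pvStepB _ _
  rw [hB]
  obtain ⟨ha, hb, -, -⟩ := pvB_inv (pvContribs (PySem.List.sorted spells (fun p => p.1) false))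
      PySem.Dict.empty PySem.Dict.empty (fun c => rfl)
      (fun c h => (h (PySem.Dict.getD_empty c [])).elim)
  have hkeys : ((pvContribs (PySem.List.sorted spells (fun p => p.1) false)).foldl pvStepB
      (PySem.Dict.empty, PySem.Dict.empty)).1.keys
      = PySem.Set.ofList ((pvContribs (PySem.List.sorted spells (fun p => p.1) false)).map (fun q => q.1)) := by
    rw [hb, PySem.Dict.keys_empty]
    rfl
  rw [PySem.Dict.items_eq_map_keys _ (by rw [hkeys]; exact PySem.Set.nodup_ofList _) [], hkeys]
  congr 1
  apply List.map_congr_left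
  intro k hk
  rw [ha k, PySem.Dict.getD_empty]
  rfl

-- sorting the input by name makes every class's name stream nondecreasing
lemma pv_names_sorted_pairwise (spells : List (String × List (String × List String))) (c : String) :
    (pvNames (PySem.List.sorted spells (fun p => p.1) false) c).Pairwise (· ≤ ·) := by
  unfold pvNames
  rw [List.pairwise_map]
  refine List.Pairwise.sublist List.filter_sublist ?_
  unfold pvContribs
  rw [List.pairwise_flatMap]
  constructor
  · intro p hp
    rw [List.pairwise_map]
    exact List.pairwise_of_forall_mem_list (fun a _ b _ => le_refl _)
  · exact (PySem.List.sorted_pairwise spells (fun p => p.1)).imp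
      (fun hab x hx y hy => by
        obtain ⟨xa, -, rfl⟩ := List.mem_map.mp hx
        obtain ⟨ya, -, rfl⟩ := List.mem_map.mp hy
        exact hab)

-- per class, A's sorted(set(bucket)) is exactly B's first-occurrence list from the sorted input
lemma pv_value_eq (spells : List (String × List (String × List String))) (c : String) :
    pvV spells c
      = PySem.Set.ofList (pvNames (PySem.List.sorted spells (fun p => p.1) false) c) := by
  have hperm : (pvContribs (PySem.List.sorted spells (fun p => p.1) false)).Perm (pvContribs spells) :=
    List.Perm.flatMap (PySem.List.sorted_perm spells (fun p => p.1) false) (fun a _ => List.Perm.refl _)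
  have hpn : (pvNames (PySem.List.sorted spells (fun p => p.1) false) c).Perm (pvNames spells c) :=
    (hperm.filter _).map _
  have h1 : (PySem.Set.ofList (pvNames (PySem.List.sorted spells (fun p => p.1) false) c)).Perm
      (PySem.Set.ofList (pvNames spells c)) :=
    (List.perm_ext_iff_of_nodup (PySem.Set.nodup_ofList _) (PySem.Set.nodup_ofList _)).mpr
      (fun a => by simp [PySem.Set.mem_ofList, hpn.mem_iff])
  exact PySem.List.sorted_eq_of_perm_of_pairwise_lt _ _ _ h1
    (pv_ofList_pairwise_lt (pv_names_sorted_pairwise spells c))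

-- ===== VERDICT (by name: the statement is the Claim_ definition above) =====
theorem collect_class_spell_lists_py_spec : Claim_equal_collect_class_spell_lists_py := by
  intro spells _
  unfold Spec_collect_class_spell_lists_py
  rw [portA_eq, portB_eq]
  simp only [← pv_value_eq]
  have hperm : (pvContribs (PySem.List.sorted spells (fun p => p.1) false)).Perm (pvContribs spells) :=
    List.Perm.flatMap (PySem.List.sorted_perm spells (fun p => p.1) false) (fun a _ => List.Perm.refl _)
  have hK : (PySem.Set.ofList ((pvContribs (PySem.List.sorted spells (fun p => p.1) false)).map (fun q => q.1))).Perm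
      (PySem.Set.ofList ((pvContribs spells).map (fun q => q.1))) :=
    (List.perm_ext_iff_of_nodup (PySem.Set.nodup_ofList _) (PySem.Set.nodup_ofList _)).mpr
      (fun a => by simp [PySem.Set.mem_ofList, (hperm.map _).mem_iff])
  have hpair : ((PySem.List.sorted (PySem.Set.ofList ((pvContribs spells).map (fun q => q.1))) (fun x => x) false).map
      (fun k => (k, pvV spells k))).Pairwise (fun a b => a.1 < b.1) :=
    List.pairwise_map.mpr (PySem.List.sorted_ofList_pairwise_lt _)
  rw [PySem.List.sorted_eq_of_perm_of_pairwise_lt _ _ _ ((PySem.List.sorted_perm _ _ _).map _) hpair,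
      PySem.List.sorted_eq_of_perm_of_pairwise_lt _ _ _
        (((PySem.List.sorted_perm _ _ _).trans hK.symm).map _) hpair]
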